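-- pv_equiv track=rewrite | github.com/eitanturok/code-tags | src/clean_code_gen.py | clean_code_gen
-- ===== SOURCE A (Python) =====
-- def round_to_multiple(number, multiple):
--     "A tab is usually 4 spaces."
--     return multiple * round(number / multiple)
--
-- def get_stop_words():
--     stop_words = ["<commit_before>", "<commit_msg>", "<commit_after>"]
--
--     python_words = ["class", "def", "#", "@", "print", "if", "assert"]
--     prefixes = ["\n"]
--     separators = ["", " "]
--
--     for python_word in python_words:
--         for prefix in prefixes:
--             for separator in separators:
--                 stop_words += [prefix + separator + python_word]
--     return stop_words
--
-- def clean_code_gen(code_gen):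
--
--     # Remove all text that occurs after the first stop_word
--     stop_words = get_stop_words()
--     for w in stop_words:
--         if w in code_gen:
--             code_gen = code_gen[: code_gen.find(w)]
--
--     # 1 tab=4 whitespaces. Round number of leading whitespaces to closest multiple of 4.
--     lines = []
--     for i, line in enumerate(code_gen.split("\n")):
--         n_whitespaces = len(line) - len(
--             line.lstrip(" ")
--         )  # only remove whitespace, not tabs
--         new_whitespaces = " " * round_to_multiple(n_whitespaces, 4)
--         line = new_whitespaces + line[n_whitespaces:]
--         lines.append(line)
--     code_gen = "\n".join(lines)
--
--     ### Find the first occasion where a chain of {} is closed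
--     # Equivalently, find where the indentation of a python function ends
--     # Adapted from https://github.com/bigcode-project/bigcode-evaluation-harness/blob/00967d12093ef614de7bdad0772aed8e4118f1fd/bigcode_eval/tasks/humanevalpack.py#L284
--     for i, line in enumerate(code_gen.split("\n")):
--         if len(line.strip()) > 0 and line[0] != " " and line[0] != "\t":
--             code_gen = "\n".join(code_gen.split("\n")[:i])
--             break
--
--     return code_gen.strip()
-- ===== SOURCE B (Python) =====
-- def round_to_multiple(number, multiple):
--     "A tab is usually 4 spaces."
--     return multiple * round(number / multiple)
--
-- STOP_WORDS = (
--     ["<commit_before>", "<commit_msg>", "<commit_after>"]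
--     + ["\n" + sep + w
--        for w in ["class", "def", "#", "@", "print", "if", "assert"]
--        for sep in ["", " "]]
-- )
--
-- def clean_code_gen(code_gen):
--     # Truncate at the first occurrence of each stop word, in order.
--     for w in STOP_WORDS:
--         if w in code_gen:
--             code_gen = code_gen[: code_gen.find(w)]
--
--     # Single pass: normalize each line's leading spaces to a multiple of 4 and
--     # stop as soon as a normalized line is non-empty and not indented.
--     kept = []
--     for line in code_gen.split("\n"):
--         n = len(line) - len(line.lstrip(" "))
--         new = " " * round_to_multiple(n, 4) + line[n:]
--         if len(new.strip()) > 0 and new[0] != " " and new[0] != "\t":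
--             break
--         kept.append(new)
--     return "\n".join(kept).strip()
-- ===== Notes on version B (the rewrite author's own statement) =====
-- stated objective: simpler
-- what changed: B replaces A's three sequential line passes (normalize-all then join, then re-split and scan for the first non-indented line, then re-split and re-join the prefix) with one loop that normalizes each line and breaks immediately at the first non-empty non-indented normalized line; the stop-word list is a flat literal/comprehension instead of A's nested building loops.
import Mathlib
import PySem

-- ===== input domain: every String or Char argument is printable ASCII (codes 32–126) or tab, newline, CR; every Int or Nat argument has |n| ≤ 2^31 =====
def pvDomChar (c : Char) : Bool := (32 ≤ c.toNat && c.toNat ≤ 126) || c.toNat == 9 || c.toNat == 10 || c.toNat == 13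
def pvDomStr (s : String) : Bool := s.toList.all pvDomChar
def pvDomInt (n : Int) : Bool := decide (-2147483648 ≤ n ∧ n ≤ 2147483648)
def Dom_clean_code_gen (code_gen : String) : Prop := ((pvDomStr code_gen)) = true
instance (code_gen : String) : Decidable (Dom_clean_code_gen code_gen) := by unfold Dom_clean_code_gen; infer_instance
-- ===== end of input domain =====

-- B replaces A's three sequential line passes (normalize all + join, re-split and scan,
-- re-split and re-join a prefix) by ONE normalize-and-break loop; same cost (objective: simpler).

-- Python round_to_multiple(number, 4) for a nonnegative int number: 4 * round(number/4).
-- number/4 is exactly representable as a float, so round is exact banker's rounding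
-- (halves go to the even quotient); this closed form reproduces it exactly.
def pvRoundToMultiple (number multiple : Nat) : Nat :=
  let q := number / multiple
  let r := number % multiple
  multiple * (if 2 * r < multiple then q
              else if multiple < 2 * r then q + 1
              else if q % 2 = 0 then q else q + 1)

-- One line-normalization step (shared text of both Pythons):
-- n = len(line) - len(line.lstrip(" "))  (lstrip(" ") drops only leading spaces = dropWhile (= ' '), exact)
-- line = " " * round_to_multiple(n, 4) + line[n:]
def pvNorm (line : List Char) : List Char :=
  let n := line.length - (line.dropWhile (· == ' ')).length
  List.replicate (pvRoundToMultiple n 4) ' ' ++ PySem.List.slice line (some (n : Int)) none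

-- The break condition (identical text in both Pythons):
-- len(line.strip()) > 0 and line[0] != " " and line[0] != "\t"
def pvBadLine (l : List Char) : Bool :=
  if 0 < (PySem.Chars.strip l).length then
    !(PySem.List.pyGet? l 0 == some ' ') && !(PySem.List.pyGet? l 0 == some '\t')
  else false

-- ===== PORT A =====
-- get_stop_words(): base list, then the nested building loops
def pvStopWordsA : List String :=
  let stop_words := ["<commit_before>", "<commit_msg>", "<commit_after>"]
  ["class", "def", "#", "@", "print", "if", "assert"].foldl (fun sw python_word =>
    ["\n"].foldl (fun sw prefix_ =>
      ["", " "].foldl (fun sw separator =>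
        sw ++ [prefix_ ++ separator ++ python_word]) sw) sw) stop_words

-- 'for i, line in enumerate(...): if cond: ... break' — index of the first bad line
def pvFindBreak : List (List Char) → Option Nat
  | [] => none
  | l :: r => if pvBadLine l then some 0 else (pvFindBreak r).map (· + 1)

-- the two line passes of A (after the stop-word truncation), as a helper
def pvTailA (cg : String) : String :=
  -- lines = []; for line in code_gen.split("\n"): ... lines.append(line)
  let lines := (PySem.Chars.splitOn cg.toList ['\n']).foldl (fun acc line => acc ++ [pvNorm line]) []
  -- code_gen = "\n".join(lines)
  let cg2 := PySem.Chars.join ['\n'] lines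
  -- for i, line in enumerate(code_gen.split("\n")): if cond: code_gen = "\n".join(code_gen.split("\n")[:i]); break
  let ls2 := PySem.Chars.splitOn cg2 ['\n']
  let cg3 := match pvFindBreak ls2 with
    | some i => PySem.Chars.join ['\n'] (PySem.List.slice ls2 none (some (i : Int)))
    | none => cg2
  -- return code_gen.strip()
  String.ofList (PySem.Chars.strip cg3)

def clean_code_gen (code_gen : String) : String :=
  -- for w in stop_words: if w in code_gen: code_gen = code_gen[:code_gen.find(w)]
  pvTailA (pvStopWordsA.foldl (fun cg w =>
    if PySem.Str.isIn w cg then PySem.Str.slice cg none (some (PySem.Str.find cg w)) else cg) code_gen)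

-- ===== PORT B =====
-- B's stop words: base list plus a flat comprehension
def pvStopWordsB : List String :=
  ["<commit_before>", "<commit_msg>", "<commit_after>"] ++
    (["class", "def", "#", "@", "print", "if", "assert"].flatMap (fun w =>
      ["", " "].map (fun sep => "\n" ++ sep ++ w)))

-- B's single loop: normalize each line, break (collect nothing more) at the first bad one
def pvCollect : List (List Char) → List (List Char)
  | [] => []
  | l :: r =>
    let new := pvNorm l
    if pvBadLine new then [] else new :: pvCollect r

-- B's normalize-and-break pass plus join/strip, as a helper
def pvTailB (cg : String) : String :=
  let kept := pvCollect (PySem.Chars.splitOn cg.toList ['\n'])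
  String.ofList (PySem.Chars.strip (PySem.Chars.join ['\n'] kept))

def clean_code_gen_alt (code_gen : String) : String :=
  pvTailB (pvStopWordsB.foldl (fun cg w =>
    if PySem.Str.isIn w cg then PySem.Str.slice cg none (some (PySem.Str.find cg w)) else cg) code_gen)

-- ===== PRECONDITION & SPEC =====
def Spec_clean_code_gen (code_gen : String) (out : String) : Prop := out = clean_code_gen_alt code_gen
instance (code_gen : String) (out : String) : Decidable (Spec_clean_code_gen code_gen out) := by unfold Spec_clean_code_gen; infer_instance

-- ===== CLAIM (what is proved, stated in full; the proofs are below) =====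
def Claim_equal_clean_code_gen : Prop := ∀ (code_gen : String), Dom_clean_code_gen code_gen → Spec_clean_code_gen code_gen (clean_code_gen code_gen)

-- ===== LEMMAS AND PROOFS =====

theorem pv_stopwords_eq : pvStopWordsB = pvStopWordsA := by decide

-- splitOn.go step equations
theorem pv_go_zero (l cur : List Char) (acc : List (List Char)) :
    PySem.Chars.splitOn.go ['\n'] 0 l cur acc = ((cur.reverse ++ l) :: acc).reverse := by
  simp [PySem.Chars.splitOn.go]

theorem pv_go_nil (f : Nat) (cur : List Char) (acc : List (List Char)) :
    PySem.Chars.splitOn.go ['\n'] (f + 1) [] cur acc = (cur.reverse :: acc).reverse := by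
  simp [PySem.Chars.splitOn.go]

theorem pv_go_cons (f : Nat) (c : Char) (rest cur : List Char) (acc : List (List Char)) (hc : c ≠ '\n') :
    PySem.Chars.splitOn.go ['\n'] (f + 1) (c :: rest) cur acc
      = PySem.Chars.splitOn.go ['\n'] f rest (c :: cur) acc := by
  rw [PySem.Chars.splitOn.go]
  simp [List.isPrefixOf, Ne.symm hc]

theorem pv_go_nl (f : Nat) (rest cur : List Char) (acc : List (List Char)) :
    PySem.Chars.splitOn.go ['\n'] (f + 1) ('\n' :: rest) cur acc
      = PySem.Chars.splitOn.go ['\n'] f rest [] (cur.reverse :: acc) := by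
  rw [PySem.Chars.splitOn.go]
  simp [List.isPrefixOf]

-- consuming a '\n'-free block
theorem pv_go_skip (l : List Char) (h : '\n' ∉ l) :
    ∀ (fuel : Nat) (m cur : List Char) (acc : List (List Char)),
      PySem.Chars.splitOn.go ['\n'] (l.length + fuel) (l ++ m) cur acc
        = PySem.Chars.splitOn.go ['\n'] fuel m (l.reverse ++ cur) acc := by
  induction l with
  | nil => intro fuel m cur acc; simp
  | cons c l' ih =>
    intro fuel m cur acc
    have hc : c ≠ '\n' := fun hcc => h (hcc ▸ List.mem_cons_self)
    have h' : '\n' ∉ l' := fun hm => h (List.mem_cons_of_mem _ hm)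
    have : (c :: l').length + fuel = (l'.length + fuel) + 1 := by simp; omega
    rw [this]
    show PySem.Chars.splitOn.go ['\n'] ((l'.length + fuel) + 1) (c :: (l' ++ m)) cur acc = _
    rw [pv_go_cons _ _ _ _ _ hc, ih h' fuel m (c :: cur) acc]
    simp

theorem pv_go_join :
    ∀ (N : List (List Char)) (l cur : List Char) (acc : List (List Char)) (f : Nat),
      '\n' ∉ l → (∀ x ∈ N, '\n' ∉ x) →
      PySem.Chars.splitOn.go ['\n'] ((PySem.Chars.join ['\n'] (l :: N)).length + f + 1)
          (PySem.Chars.join ['\n'] (l :: N)) cur acc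
        = acc.reverse ++ (cur.reverse ++ l) :: N := by
  intro N
  induction N with
  | nil =>
    intro l cur acc f hl _
    rw [PySem.Chars.join_singleton]
    have : l.length + f + 1 = l.length + (f + 1) := by omega
    rw [this]
    have := pv_go_skip l hl (f + 1) [] cur acc
    simp only [List.append_nil] at this
    rw [this, pv_go_nil]
    simp
  | cons l₂ N' ih =>
    intro l cur acc f hl hN
    have hl₂ : '\n' ∉ l₂ := hN l₂ List.mem_cons_self
    have hN' : ∀ x ∈ N', '\n' ∉ x := fun x hx => hN x (List.mem_cons_of_mem _ hx)
    rw [PySem.Chars.join_cons_cons]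
    have hlen : (l ++ ['\n'] ++ PySem.Chars.join ['\n'] (l₂ :: N')).length + f + 1
        = l.length + (((PySem.Chars.join ['\n'] (l₂ :: N')).length + f + 1) + 1) := by
      simp; omega
    rw [hlen]
    have harr : l ++ ['\n'] ++ PySem.Chars.join ['\n'] (l₂ :: N')
        = l ++ ('\n' :: PySem.Chars.join ['\n'] (l₂ :: N')) := by simp
    rw [harr, pv_go_skip l hl _ _ cur acc, pv_go_nl]
    have hrv : (l.reverse ++ cur).reverse = cur.reverse ++ l := by simp
    rw [hrv, ih l₂ [] ((cur.reverse ++ l) :: acc) f hl₂ hN']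
    simp

theorem pv_splitOn_join (l : List Char) (N : List (List Char))
    (hl : '\n' ∉ l) (hN : ∀ x ∈ N, '\n' ∉ x) :
    PySem.Chars.splitOn (PySem.Chars.join ['\n'] (l :: N)) ['\n'] = l :: N := by
  show PySem.Chars.splitOn.go ['\n'] ((PySem.Chars.join ['\n'] (l :: N)).length + 1) _ [] [] = _
  have := pv_go_join N l [] [] 0 hl hN
  simpa using this

-- every piece of splitOn s ['\n'] is '\n'-free
theorem pv_go_no_nl :
    ∀ (fuel : Nat) (l cur : List Char) (acc : List (List Char)),
      l.length < fuel → '\n' ∉ cur → (∀ y ∈ acc, '\n' ∉ y) →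
      ∀ x ∈ PySem.Chars.splitOn.go ['\n'] fuel l cur acc, '\n' ∉ x := by
  intro fuel
  induction fuel with
  | zero => intro l cur acc h; omega
  | succ f ih =>
    intro l cur acc hlen hcur hacc x hx
    match l with
    | [] =>
      rw [pv_go_nil] at hx
      simp only [List.mem_reverse, List.mem_cons] at hx
      rcases hx with h | h
      · subst h; simpa using hcur
      · exact hacc x h
    | c :: rest =>
      by_cases hc : c = '\n'
      · subst hc
        rw [pv_go_nl] at hx
        refine ih rest [] (cur.reverse :: acc) (by simp at hlen ⊢; omega) (by simp) ?_ x hx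
        intro y hy
        rcases List.mem_cons.mp hy with h | h
        · subst h; simpa using hcur
        · exact hacc y h
      · rw [pv_go_cons _ _ _ _ _ hc] at hx
        refine ih rest (c :: cur) acc (by simp at hlen ⊢; omega) ?_ hacc x hx
        intro hmem
        rcases List.mem_cons.mp hmem with h | h
        · exact hc h.symm
        · exact hcur h

theorem pv_splitOn_no_nl (s : List Char) :
    ∀ x ∈ PySem.Chars.splitOn s ['\n'], '\n' ∉ x := by
  intro x hx
  exact pv_go_no_nl (s.length + 1) s [] [] (by omega) (by simp) (by simp) x hx

-- splitOn never returns []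
theorem pv_go_ne_nil :
    ∀ (fuel : Nat) (l cur : List Char) (acc : List (List Char)),
      PySem.Chars.splitOn.go ['\n'] fuel l cur acc ≠ [] := by
  intro fuel
  induction fuel with
  | zero => intro l cur acc; rw [pv_go_zero]; simp
  | succ f ih =>
    intro l cur acc
    match l with
    | [] => rw [pv_go_nil]; simp
    | c :: rest =>
      by_cases hc : c = '\n'
      · subst hc; rw [pv_go_nl]; exact ih _ _ _
      · rw [pv_go_cons _ _ _ _ _ hc]; exact ih _ _ _

theorem pv_splitOn_ne_nil (s : List Char) : PySem.Chars.splitOn s ['\n'] ≠ [] :=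
  pv_go_ne_nil (s.length + 1) s [] []

-- pvNorm keeps lines '\n'-free
theorem pv_norm_no_nl (l : List Char) (h : '\n' ∉ l) : '\n' ∉ pvNorm l := by
  unfold pvNorm
  intro hmem
  rcases List.mem_append.mp hmem with h1 | h1
  · have := List.eq_of_mem_replicate h1; exact absurd this (by decide)
  · rw [PySem.List.slice_from l (by positivity)] at h1
    exact h (List.mem_of_mem_drop h1)

-- B's loop computes the pre-break prefix of the normalized lines
theorem pv_collect_eq (L : List (List Char)) :
    pvCollect L = match pvFindBreak (L.map pvNorm) with
      | some i => (L.map pvNorm).take i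
      | none => L.map pvNorm := by
  induction L with
  | nil => simp [pvCollect, pvFindBreak]
  | cons l r ih =>
    by_cases hb : pvBadLine (pvNorm l)
    · simp [pvCollect, pvFindBreak, hb]
    · simp only [pvCollect, pvFindBreak, List.map_cons, hb, if_neg, Bool.false_eq_true,
        not_false_eq_true, ih]
      cases h : pvFindBreak (r.map pvNorm) with
      | none => simp
      | some j => simp

-- take i via PySem slice
theorem pv_slice_take {α : Type} (xs : List α) (i : Nat) :
    PySem.List.slice xs none (some (i : Int)) = xs.take i := by
  rw [PySem.List.slice_to xs (by positivity)]
  simp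

-- the whole post-truncation computation, A-shape = B-shape, for any already-truncated text
theorem pv_main (cg : String) : pvTailA cg = pvTailB cg := by
  unfold pvTailA pvTailB
  simp only [PySem.List.foldl_append_singleton_eq_map, List.nil_append]
  have hno : ∀ x ∈ PySem.Chars.splitOn cg.toList ['\n'], '\n' ∉ x := pv_splitOn_no_nl _
  have hne : PySem.Chars.splitOn cg.toList ['\n'] ≠ [] := pv_splitOn_ne_nil _
  obtain ⟨l0, L', hL⟩ := List.exists_cons_of_ne_nil hne
  rw [hL] at hno ⊢
  have hsj : PySem.Chars.splitOn (PySem.Chars.join ['\n'] (pvNorm l0 :: L'.map pvNorm)) ['\n']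
      = pvNorm l0 :: L'.map pvNorm := by
    refine pv_splitOn_join _ _ (pv_norm_no_nl _ (hno l0 List.mem_cons_self)) ?_
    intro x hx
    obtain ⟨y, hy, rfl⟩ := List.mem_map.mp hx
    exact pv_norm_no_nl _ (hno y (List.mem_cons_of_mem _ hy))
  simp only [List.map_cons] at hsj ⊢
  rw [hsj, pv_collect_eq]
  simp only [List.map_cons]
  cases h : pvFindBreak (pvNorm l0 :: L'.map pvNorm) with
  | none => dsimp only
  | some i => dsimp only; rw [pv_slice_take]

-- ===== VERDICT (by name: the statement is the Claim_ definition above) =====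
theorem clean_code_gen_spec : Claim_equal_clean_code_gen := by
  intro code_gen _
  unfold Spec_clean_code_gen clean_code_gen clean_code_gen_alt
  rw [pv_stopwords_eq]
  exact pv_main _
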